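-- pv_equiv track=rewrite | github.com/madcpt/OpenDialKG | preprocess/kg_dataloader.py | get_two_hop_paths
-- ===== SOURCE A (Python) =====
-- def get_two_hop_paths(start, connection_map):
--     two_hop_paths = []
--     for r1, t1s in connection_map[start].items():
--         for t1 in t1s:
--             two_hop_paths.append((start, r1, t1))
--             for r2, t2s in connection_map[t1].items():
--                 for t2 in t2s:
--                     two_hop_paths.append((start, r1, t1, r2, t2))
--     return two_hop_paths
-- ===== SOURCE B (Python) =====
-- def get_two_hop_paths(start, connection_map):
--     out = []
--
--     def expand(prefix, node, depth):
--         for r, ts in connection_map[node].items():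
--             for t in ts:
--                 path = prefix + (r, t)
--                 out.append(path)
--                 if depth > 0:
--                     expand(path, t, depth - 1)
--
--     expand((start,), start, 1)
--     return out
-- ===== Notes on version B (the rewrite author's own statement) =====
-- stated objective: alternative
-- what changed: Replaces the four hand-nested loops with a recursive bounded-depth path expander expand(prefix, node, depth) started at depth 1, which emits each extended path and recurses once; same DFS emission order and same KeyError behaviour.
import Mathlib
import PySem

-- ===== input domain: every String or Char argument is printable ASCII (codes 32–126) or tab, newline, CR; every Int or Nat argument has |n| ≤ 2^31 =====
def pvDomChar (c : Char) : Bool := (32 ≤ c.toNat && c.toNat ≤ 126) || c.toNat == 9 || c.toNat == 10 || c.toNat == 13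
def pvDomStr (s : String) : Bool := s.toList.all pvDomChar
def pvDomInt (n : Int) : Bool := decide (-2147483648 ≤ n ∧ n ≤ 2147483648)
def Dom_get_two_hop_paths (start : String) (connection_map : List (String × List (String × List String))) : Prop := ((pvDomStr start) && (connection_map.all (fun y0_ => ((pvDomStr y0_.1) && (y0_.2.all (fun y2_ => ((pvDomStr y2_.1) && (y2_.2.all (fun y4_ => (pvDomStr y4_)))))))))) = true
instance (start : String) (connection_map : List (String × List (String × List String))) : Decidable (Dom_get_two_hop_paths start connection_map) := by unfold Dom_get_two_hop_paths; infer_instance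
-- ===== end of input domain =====

-- B replaces A's four hand-nested loops by a recursive bounded-depth path expander (same order, same values); objective: alternative decomposition.
-- ===== PORT A =====
-- first-match lookup in the association list (Python dict access connection_map[key])
def pvLookup (cm : List (String × List (String × List String))) (k : String) :
    Option (List (String × List String)) :=
  (cm.find? (fun p => p.1.toList == k.toList)).map (·.2)  -- String equality via the char lists (kernel-reducible)

-- A's two innermost loops (over connection_map[t1].items() and t2s)
def pvA_inner2 (start r1 t1 : String) (d2 : List (String × List String)) (acc : List (List String)) : List (List String) :=
  d2.foldl (fun acc p2 => p2.2.foldl (fun acc t2 => acc ++ [[start, r1, t1, p2.1, t2]]) acc) acc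

-- A's body for one t1: append the 3-tuple, then run the two inner loops
def pvA_body (cm : List (String × List (String × List String))) (start r1 : String)
    (acc : List (List String)) (t1 : String) : List (List String) :=
  let acc := acc ++ [[start, r1, t1]]
  match pvLookup cm t1 with
  | none => acc   -- Python raises KeyError here; excluded by Pre_
  | some d2 => pvA_inner2 start r1 t1 d2 acc

def get_two_hop_paths (start : String) (connection_map : List (String × List (String × List String))) : List (List String) :=
  match pvLookup connection_map start with
  | none => []   -- Python raises KeyError here; excluded by Pre_
  | some d1 =>
    d1.foldl (fun acc p1 => p1.2.foldl (pvA_body connection_map start p1.1) acc) []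

-- ===== PORT B =====
-- B: bounded-depth recursive path expander (expand(prefix, node, depth) from Source B)
def pvExpand (cm : List (String × List (String × List String))) :
    Nat → List String → String → List (List String)
  | depth, prefx, node =>
    match pvLookup cm node with
    | none => []   -- Python raises KeyError here; excluded by Pre_
    | some d =>
      d.foldl (fun acc p =>
        p.2.foldl (fun acc t =>
          acc ++ [prefx ++ [p.1, t]] ++
            (match depth with
             | 0 => []
             | n + 1 => pvExpand cm n (prefx ++ [p.1, t]) t)) acc) []
  termination_by depth _ _ => depth

def get_two_hop_paths_alt (start : String) (connection_map : List (String × List (String × List String))) : List (List String) :=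
  pvExpand connection_map 1 [start] start

-- ===== PRECONDITION & SPEC =====
-- Pre_ excludes exactly the inputs where Python A raises KeyError: 'start' must be a key,
-- and every one-hop target t1 reachable from 'start' must be a key.
def Pre_get_two_hop_paths (start : String) (connection_map : List (String × List (String × List String))) : Prop :=
  (pvLookup connection_map start).isSome = true ∧
  ∀ p ∈ (pvLookup connection_map start).getD [], ∀ t ∈ p.2,
    (pvLookup connection_map t).isSome = true

instance (start : String) (connection_map : List (String × List (String × List String))) : Decidable (Pre_get_two_hop_paths start connection_map) := by unfold Pre_get_two_hop_paths; infer_instance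

def pvWitness_get_two_hop_paths : String × (List (String × List (String × List String))) :=
  ("s", [("s", [("r", ["a", "b"])]), ("a", [("x", ["q"])]), ("b", [])])

def Spec_get_two_hop_paths (start : String) (connection_map : List (String × List (String × List String))) (out : List (List String)) : Prop := out = get_two_hop_paths_alt start connection_map
instance (start : String) (connection_map : List (String × List (String × List String))) (out : List (List String)) : Decidable (Spec_get_two_hop_paths start connection_map out) := by unfold Spec_get_two_hop_paths; infer_instance

-- ===== CLAIM (what is proved, stated in full; the proofs are below) =====
def Claim_equal_get_two_hop_paths : Prop := ∀ (start : String) (connection_map : List (String × List (String × List String))), Dom_get_two_hop_paths start connection_map → Pre_get_two_hop_paths start connection_map → Spec_get_two_hop_paths start connection_map (get_two_hop_paths start connection_map)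

-- ===== LEMMAS AND PROOFS =====

theorem flatMap_single {A B : Type} (l : List A) (f : A → B) :
    l.flatMap (fun x => [f x]) = l.map f := by
  induction l with
  | nil => rfl
  | cons a t ih => simp [List.flatMap_cons, ih]

-- the second-hop contribution from node t1 with prefix pre, as one flatMap
def hop2 (cm : List (String × List (String × List String))) (pre : List String) (t1 : String) : List (List String) :=
  (pvLookup cm t1).elim [] (fun d2 => d2.flatMap (fun p2 => p2.2.map (fun t2 => pre ++ [p2.1, t2])))

theorem pvA_body_eq (cm : List (String × List (String × List String))) (start r1 : String)
    (acc : List (List String)) (t1 : String) :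
    pvA_body cm start r1 acc t1 = acc ++ ([start, r1, t1] :: hop2 cm [start, r1, t1] t1) := by
  rw [pvA_body, hop2]
  cases pvLookup cm t1 with
  | none => simp
  | some d2 =>
    simp [pvA_inner2, ← List.flatMap_def, flatMap_single]

theorem pvA_inner_eq (cm : List (String × List (String × List String))) (start r1 : String)
    (ts : List String) (acc : List (List String)) :
    ts.foldl (pvA_body cm start r1) acc
      = acc ++ ts.flatMap (fun t1 => [start, r1, t1] :: hop2 cm [start, r1, t1] t1) := by
  have h : pvA_body cm start r1
      = fun acc t1 => acc ++ ([start, r1, t1] :: hop2 cm [start, r1, t1] t1) :=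
    funext fun acc => funext fun t1 => pvA_body_eq cm start r1 acc t1
  rw [h, PySem.List.foldl_append_eq_flatMap]

theorem expand0_eq (cm : List (String × List (String × List String))) (pre : List String) (t : String) :
    pvExpand cm 0 pre t = hop2 cm pre t := by
  rw [pvExpand, hop2]
  cases pvLookup cm t with
  | none => rfl
  | some d =>
    simp [← List.flatMap_def, flatMap_single]

theorem main_eq (start : String) (cm : List (String × List (String × List String))) :
    get_two_hop_paths start cm = get_two_hop_paths_alt start cm := by
  rw [get_two_hop_paths, get_two_hop_paths_alt, pvExpand]
  cases pvLookup cm start with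
  | none => rfl
  | some d1 =>
    simp only [pvA_inner_eq, expand0_eq]
    simp [List.append_assoc, ← List.flatMap_def]

-- ===== VERDICT (by name: the statement is the Claim_ definition above) =====
theorem get_two_hop_paths_spec : Claim_equal_get_two_hop_paths := by
  intro start cm _ _
  unfold Spec_get_two_hop_paths
  exact main_eq start cm
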